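-- pv_equiv track=rewrite | github.com/OceanDECRUZ/IPSA_Project | Rescuing_human_robot/In512.py | third_contour
-- ===== SOURCE A (Python) =====
-- N=20 #nombre de pixel en y
--
-- M=20 #nombre de prixel en x
--
-- def first_contour(cell):
--     L=[]
--     for i in range(-1,2):
--         for j in range(-1,2):
--             if (i!=0 or j!=0) and 0<=i+cell[0]<N and 0<=j+cell[1]<M:
--                 L.append((cell[0]+i,cell[1]+j))
--     return L
--
-- def second_contour(cell):
--     L=[]
--     fc=first_contour(cell)
--     for i in range(-2,3):
--         for j in range(-2,3):
--             if (i!=0 or j!=0) and not((i+cell[0],j+cell[1]) in fc) and 0<=i+cell[0]<N and 0<=j+cell[1]<M: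
--                     L.append((cell[0]+i,cell[1]+j))
--     return L
--
-- def third_contour(cell):
--     L=[]
--     fc=first_contour(cell)
--     sc=second_contour(cell)
--     for i in range(-3,4):
--         for j in range(-3,4):
--             if (i!=0 or j!=0) and not((i+cell[0],j+cell[1]) in fc) and not((i+cell[0],j+cell[1]) in sc) and 0<=i+cell[0]<N and 0<=j+cell[1]<M:
--                     L.append((cell[0]+i,cell[1]+j))
--     return L
-- ===== SOURCE B (Python) =====
-- N = 20
-- M = 20
--
-- def third_contour(cell):
--     L = []
--     for i in range(-3, 4):
--         for j in range(-3, 4):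
--             if max(abs(i), abs(j)) == 3 and 0 <= i + cell[0] < N and 0 <= j + cell[1] < M:
--                 L.append((cell[0] + i, cell[1] + j))
--     return L
-- ===== Notes on version B (the rewrite author's own statement) =====
-- stated objective: simpler
-- what changed: B drops the construction of the first/second contour lists and their membership exclusion tests entirely, testing ring membership with the closed-form condition max(abs(i),abs(j))==3 inside the same i,j loop, so the output order is identical.
import Mathlib
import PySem

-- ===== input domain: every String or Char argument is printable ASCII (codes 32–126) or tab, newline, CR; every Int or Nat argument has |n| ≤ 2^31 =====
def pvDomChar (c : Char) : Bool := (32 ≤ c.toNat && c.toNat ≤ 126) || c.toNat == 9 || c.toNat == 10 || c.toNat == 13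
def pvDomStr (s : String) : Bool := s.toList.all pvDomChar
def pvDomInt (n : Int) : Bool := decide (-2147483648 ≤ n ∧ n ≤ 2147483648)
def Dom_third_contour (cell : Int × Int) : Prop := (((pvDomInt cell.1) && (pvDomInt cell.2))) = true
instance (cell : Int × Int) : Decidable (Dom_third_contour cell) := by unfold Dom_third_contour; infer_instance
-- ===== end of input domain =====

-- B replaces A's construction of first/second contour lists and the membership exclusion
-- by the closed-form ring test max(|i|,|j|) = 3; same loop order, so the output list is identical.

-- ===== PORT A =====
def first_contour (cell : Int × Int) : List (Int × Int) :=
  (PySem.List.pyRange (-1) 2 1).foldl (fun L i =>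
    (PySem.List.pyRange (-1) 2 1).foldl (fun L j =>
      if (i ≠ 0 ∨ j ≠ 0) ∧ (0 ≤ i + cell.1 ∧ i + cell.1 < 20) ∧ (0 ≤ j + cell.2 ∧ j + cell.2 < 20)
      then L ++ [(cell.1 + i, cell.2 + j)] else L) L) []

def second_contour (cell : Int × Int) : List (Int × Int) :=
  let fc := first_contour cell
  (PySem.List.pyRange (-2) 3 1).foldl (fun L i =>
    (PySem.List.pyRange (-2) 3 1).foldl (fun L j =>
      if (i ≠ 0 ∨ j ≠ 0) ∧ ¬ ((i + cell.1, j + cell.2) ∈ fc) ∧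
         (0 ≤ i + cell.1 ∧ i + cell.1 < 20) ∧ (0 ≤ j + cell.2 ∧ j + cell.2 < 20)
      then L ++ [(cell.1 + i, cell.2 + j)] else L) L) []

def third_contour (cell : Int × Int) : List (Int × Int) :=
  let fc := first_contour cell
  let sc := second_contour cell
  (PySem.List.pyRange (-3) 4 1).foldl (fun L i =>
    (PySem.List.pyRange (-3) 4 1).foldl (fun L j =>
      if (i ≠ 0 ∨ j ≠ 0) ∧ ¬ ((i + cell.1, j + cell.2) ∈ fc) ∧ ¬ ((i + cell.1, j + cell.2) ∈ sc) ∧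
         (0 ≤ i + cell.1 ∧ i + cell.1 < 20) ∧ (0 ≤ j + cell.2 ∧ j + cell.2 < 20)
      then L ++ [(cell.1 + i, cell.2 + j)] else L) L) []

-- ===== PORT B =====
def third_contour_alt (cell : Int × Int) : List (Int × Int) :=
  (PySem.List.pyRange (-3) 4 1).foldl (fun L i =>
    (PySem.List.pyRange (-3) 4 1).foldl (fun L j =>
      if max |i| |j| = 3 ∧ (0 ≤ i + cell.1 ∧ i + cell.1 < 20) ∧ (0 ≤ j + cell.2 ∧ j + cell.2 < 20)
      then L ++ [(cell.1 + i, cell.2 + j)] else L) L) []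

-- ===== PRECONDITION & SPEC =====
def Spec_third_contour (cell : Int × Int) (out : List (Int × Int)) : Prop := out = third_contour_alt cell
instance (cell : Int × Int) (out : List (Int × Int)) : Decidable (Spec_third_contour cell out) := by unfold Spec_third_contour; infer_instance

-- ===== CLAIM (what is proved, stated in full; the proofs are below) =====
def Claim_equal_third_contour : Prop := ∀ (cell : Int × Int), Dom_third_contour cell → Spec_third_contour cell (third_contour cell)

-- ===== LEMMAS AND PROOFS =====

lemma expand_fold (c : Int × Int) (a b : Int)
    (P : Int → Int → Prop) [∀ i j, Decidable (P i j)] (init : List (Int × Int)) :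
    (PySem.List.pyRange a b 1).foldl (fun L i =>
      (PySem.List.pyRange a b 1).foldl (fun L j =>
        if P i j then L ++ [(c.1 + i, c.2 + j)] else L) L) init =
    init ++ (PySem.List.pyRange a b 1).flatMap (fun i =>
      ((PySem.List.pyRange a b 1).filter (fun j => decide (P i j))).map
        (fun j => (c.1 + i, c.2 + j))) := by
  have h1 : ∀ (i : Int) (L : List (Int × Int)),
      (PySem.List.pyRange a b 1).foldl (fun L j =>
        if P i j then L ++ [(c.1 + i, c.2 + j)] else L) L =
      L ++ ((PySem.List.pyRange a b 1).filter (fun j => decide (P i j))).map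
        (fun j => (c.1 + i, c.2 + j)) := by
    intro i L
    exact PySem.List.foldl_append_ite (P i)
      (fun j => (c.1 + i, c.2 + j)) (PySem.List.pyRange a b 1) L
  calc (PySem.List.pyRange a b 1).foldl (fun L i =>
        (PySem.List.pyRange a b 1).foldl (fun L j =>
          if P i j then L ++ [(c.1 + i, c.2 + j)] else L) L) init
      = (PySem.List.pyRange a b 1).foldl (fun L i =>
          L ++ ((PySem.List.pyRange a b 1).filter (fun j => decide (P i j))).map
            (fun j => (c.1 + i, c.2 + j))) init := by
        exact PySem.List.foldl_congr_mem _ _ _ _ (fun L i _ => h1 i L)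
    _ = _ := PySem.List.foldl_append_eq_flatMap _ _ _

lemma mem_fc (c p : Int × Int) :
    p ∈ first_contour c ↔
      ((p.1 ≠ c.1 ∨ p.2 ≠ c.2) ∧ c.1 - 1 ≤ p.1 ∧ p.1 ≤ c.1 + 1 ∧ c.2 - 1 ≤ p.2 ∧ p.2 ≤ c.2 + 1 ∧
        0 ≤ p.1 ∧ p.1 < 20 ∧ 0 ≤ p.2 ∧ p.2 < 20) := by
  rw [first_contour, expand_fold]
  simp only [List.nil_append, List.mem_flatMap, List.mem_map, List.mem_filter,
    PySem.List.mem_pyRange_one, decide_eq_true_iff, Prod.ext_iff]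
  constructor
  · rintro ⟨i, hi, j, ⟨hj, hc⟩, h1, h2⟩
    omega
  · rintro ⟨hne, h⟩
    exact ⟨p.1 - c.1, by omega, p.2 - c.2, ⟨by omega, by omega⟩, by omega, by omega⟩

lemma mem_sc (c p : Int × Int) :
    p ∈ second_contour c ↔
      ((p.1 = c.1 + 2 ∨ p.1 = c.1 - 2 ∨ p.2 = c.2 + 2 ∨ p.2 = c.2 - 2) ∧
        c.1 - 2 ≤ p.1 ∧ p.1 ≤ c.1 + 2 ∧ c.2 - 2 ≤ p.2 ∧ p.2 ≤ c.2 + 2 ∧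
        0 ≤ p.1 ∧ p.1 < 20 ∧ 0 ≤ p.2 ∧ p.2 < 20) := by
  rw [second_contour, expand_fold]
  simp only [List.nil_append, List.mem_flatMap, List.mem_map, List.mem_filter,
    PySem.List.mem_pyRange_one, decide_eq_true_iff, Prod.ext_iff, mem_fc]
  constructor
  · rintro ⟨i, hi, j, ⟨hj, hc⟩, h1, h2⟩
    omega
  · rintro ⟨hring, h⟩
    exact ⟨p.1 - c.1, by omega, p.2 - c.2, ⟨by omega, by omega, by omega⟩, by omega, by omega⟩

lemma maxabs_eq (i j : Int) :
    max |i| |j| = 3 ↔ ((i = 3 ∨ i = -3 ∨ j = 3 ∨ j = -3) ∧ -3 ≤ i ∧ i ≤ 3 ∧ -3 ≤ j ∧ j ≤ 3) := by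
  rcases abs_cases i with ⟨h1, h2⟩ | ⟨h1, h2⟩ <;> rcases abs_cases j with ⟨h3, h4⟩ | ⟨h3, h4⟩ <;>
    rw [max_def] <;> split_ifs <;> omega

-- ===== VERDICT (by name: the statement is the Claim_ definition above) =====
theorem third_contour_spec : Claim_equal_third_contour := by
  intro cell _
  show third_contour cell = third_contour_alt cell
  simp only [third_contour, third_contour_alt]
  refine PySem.List.foldl_congr_mem _ _ _ _ ?_
  intro acc i hi
  refine PySem.List.foldl_congr_mem _ _ _ _ ?_
  intro acc2 j hj
  rw [PySem.List.mem_pyRange_one] at hi hj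
  refine if_congr ?_ rfl rfl
  rw [mem_fc, mem_sc, maxabs_eq]
  omega
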